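-- pv_equiv track=rewrite | github.com/rafayel01/python-exercises | RV_exercises_up_to_400.py | odd_in_number
-- ===== SOURCE A (Python) =====
-- def odd_in_number(num: int) -> bool:
--     t: bool = False
--     if num // 10 == 0 :
--         if num % 2 == 1:
--             t = True
--             return t
--     if num >= 10:
--         while num > 0:
--             if (num % 10) % 2 == 1:
--                 t = True
--                 break
--             else:
--                 num //= 10
--
--     return t
-- ===== SOURCE B (Python) =====
-- def odd_in_number(num: int) -> bool:
--     return num >= 0 and any(c in "13579" for c in str(num))
-- ===== Notes on version B (the rewrite author's own statement) =====
-- stated objective: idiomatic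
-- what changed: Replaces the branch-heavy mod/floordiv loop over the integer with a one-line guard plus a short-circuiting any() over the digit characters of str(num).
import Mathlib
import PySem

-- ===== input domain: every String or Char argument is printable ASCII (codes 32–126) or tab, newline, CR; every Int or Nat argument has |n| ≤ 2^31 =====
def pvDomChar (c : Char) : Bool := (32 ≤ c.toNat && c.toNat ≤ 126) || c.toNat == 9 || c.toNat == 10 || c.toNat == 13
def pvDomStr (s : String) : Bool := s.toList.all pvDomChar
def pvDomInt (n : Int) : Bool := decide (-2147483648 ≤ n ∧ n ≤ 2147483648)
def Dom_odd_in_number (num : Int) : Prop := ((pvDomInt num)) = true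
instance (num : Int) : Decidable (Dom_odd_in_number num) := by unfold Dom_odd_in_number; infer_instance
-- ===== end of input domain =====

-- B replaces A's mod/floordiv digit loop by a guard plus a short-circuiting scan of str(num)'s characters (idiomatic, same cost).

-- ===== PORT A =====
-- lemma used by the loop's decreasing_by
theorem pv_floordiv10_toNat_lt (num : Int) (h : 0 < num) :
    (PySem.Int.floordiv num 10).toNat < num.toNat := by
  rw [PySem.Int.floordiv_eq_ediv_of_pos (by omega : (0:Int) < 10)]
  omega

-- the 'while num > 0' loop of A
def odd_in_number_loop (num : Int) : Bool :=
  if h : 0 < num then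
    if PySem.Int.mod (PySem.Int.mod num 10) 2 = 1 then true
    else odd_in_number_loop (PySem.Int.floordiv num 10)
  else false
termination_by num.toNat
decreasing_by exact pv_floordiv10_toNat_lt num h

def odd_in_number (num : Int) : Bool :=
  if PySem.Int.floordiv num 10 = 0 ∧ PySem.Int.mod num 2 = 1 then true
  else if num ≥ 10 then odd_in_number_loop num
  else false

-- ===== PORT B =====
def odd_in_number_alt (num : Int) : Bool :=
  decide (num ≥ 0) && (PySem.Int.toChars num).any (fun c => PySem.Chars.isIn [c] "13579".toList)

-- ===== PRECONDITION & SPEC =====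
def Spec_odd_in_number (num : Int) (out : Bool) : Prop := out = odd_in_number_alt num
instance (num : Int) (out : Bool) : Decidable (Spec_odd_in_number num out) := by unfold Spec_odd_in_number; infer_instance

-- ===== CLAIM (what is proved, stated in full; the proofs are below) =====
def Claim_equal_odd_in_number : Prop := ∀ (num : Int), Dom_odd_in_number num → Spec_odd_in_number num (odd_in_number num)

-- ===== LEMMAS AND PROOFS =====

-- "n (as a Nat) has an odd decimal digit", in the shape the digit emission of toDigitsCore follows
def hasOddDigit (n : Nat) : Bool :=
  decide (n % 2 = 1) || (if h : n / 10 = 0 then false else hasOddDigit (n / 10))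
termination_by n
decreasing_by exact Nat.div_lt_self (by omega) (by omega)

theorem pv_isIn_digitChar (d : Nat) (hd : d < 10) :
    PySem.Chars.isIn [Nat.digitChar d] "13579".toList = decide (d % 2 = 1) := by
  interval_cases d <;> decide

theorem pv_toDigitsCore_any (f : Nat) :
    ∀ (n : Nat) (acc : List Char), n < f →
    (Nat.toDigitsCore 10 f n acc).any (fun c => PySem.Chars.isIn [c] "13579".toList)
      = (hasOddDigit n || acc.any (fun c => PySem.Chars.isIn [c] "13579".toList)) := by
  induction f with
  | zero => intro n acc h; omega
  | succ f ih =>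
    intro n acc h
    rw [Nat.toDigitsCore]
    by_cases h10 : n / 10 = 0
    · simp only [h10, if_true, List.any_cons]
      rw [pv_isIn_digitChar (n % 10) (Nat.mod_lt _ (by omega)),
        Nat.mod_mod_of_dvd n (by omega : (2:Nat) ∣ 10), hasOddDigit]
      simp [h10]
    · simp only [h10, if_false]
      rw [ih (n / 10) _ (by omega), List.any_cons,
        pv_isIn_digitChar (n % 10) (Nat.mod_lt _ (by omega)),
        Nat.mod_mod_of_dvd n (by omega : (2:Nat) ∣ 10)]
      conv_rhs => rw [hasOddDigit]
      simp only [h10, dif_neg, not_false_iff]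
      cases hasOddDigit (n / 10) <;> cases decide (n % 2 = 1) <;> simp

theorem pv_toDigits_any (n : Nat) :
    (Nat.toDigits 10 n).any (fun c => PySem.Chars.isIn [c] "13579".toList) = hasOddDigit n := by
  rw [Nat.toDigits, pv_toDigitsCore_any (n + 1) n [] (by omega)]
  simp

theorem pv_loop_eq (n : Nat) : odd_in_number_loop (n : Int) = hasOddDigit n := by
  induction n using Nat.strong_induction_on with
  | _ n ih =>
    rw [odd_in_number_loop, hasOddDigit]
    by_cases h0 : n = 0
    · subst h0; simp
    · have hpos : (0:Int) < (n : Int) := by exact_mod_cast Nat.pos_of_ne_zero h0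
      rw [dif_pos hpos]
      have hmod : PySem.Int.mod ((n : Int)) 10 = ((n % 10 : Nat) : Int) := by
        exact_mod_cast PySem.Int.mod_natCast n 10
      have hmod2 : PySem.Int.mod ((n % 10 : Nat) : Int) 2 = ((n % 10 % 2 : Nat) : Int) := by
        exact_mod_cast PySem.Int.mod_natCast (n % 10) 2
      have hdiv : PySem.Int.floordiv ((n : Int)) 10 = ((n / 10 : Nat) : Int) := by
        exact_mod_cast PySem.Int.floordiv_natCast n 10
      rw [hmod, hmod2, hdiv, ih (n / 10) (Nat.div_lt_self (Nat.pos_of_ne_zero h0) (by omega))]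
      rw [Nat.mod_mod_of_dvd n (by omega : (2:Nat) ∣ 10)]
      by_cases hodd : n % 2 = 1
      · simp [hodd]
      · have hne : ((n % 2 : Nat) : Int) ≠ 1 := by omega
        rw [if_neg hne]
        have hdec : decide (n % 2 = 1) = false := by simp [hodd]
        rw [hdec, Bool.false_or]
        by_cases h10 : n / 10 = 0
        · rw [dif_pos h10, h10, hasOddDigit]
          norm_num
        · rw [dif_neg h10]

theorem pv_alt_nonneg (n : Nat) : odd_in_number_alt (n : Int) = hasOddDigit n := by
  unfold odd_in_number_alt PySem.Int.toChars
  rw [if_neg (by omega : ¬ ((n : Int) < 0))]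
  simp only [Int.toNat_natCast]
  rw [pv_toDigits_any]
  simp

-- ===== VERDICT (by name: the statement is the Claim_ definition above) =====
theorem odd_in_number_spec : Claim_equal_odd_in_number := by
  intro num _
  unfold Spec_odd_in_number odd_in_number
  by_cases hneg : num < 0
  · have hdiv : PySem.Int.floordiv num 10 < 0 := by
      rw [PySem.Int.floordiv_eq_ediv_of_pos (by omega : (0:Int) < 10)]
      omega
    have h1 : ¬ (PySem.Int.floordiv num 10 = 0 ∧ PySem.Int.mod num 2 = 1) := by
      intro ⟨h, _⟩; omega
    have h2 : ¬ (num ≥ 10) := by omega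
    simp only [h1, if_neg, h2, not_false_iff]
    unfold odd_in_number_alt
    have : ¬ (num ≥ 0) := by omega
    simp [this]
  · -- num = ↑n for n := num.toNat
    obtain ⟨n, rfl⟩ : ∃ n : Nat, num = (n : Int) :=
      ⟨num.toNat, by omega⟩
    rw [pv_alt_nonneg n]
    have hdiv : PySem.Int.floordiv ((n : Int)) 10 = ((n / 10 : Nat) : Int) := by
      exact_mod_cast PySem.Int.floordiv_natCast n 10
    have hmod : PySem.Int.mod ((n : Int)) 2 = ((n % 2 : Nat) : Int) := by
      exact_mod_cast PySem.Int.mod_natCast n 2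
    rw [hdiv, hmod]
    by_cases h10 : n < 10
    · have hq : n / 10 = 0 := Nat.div_eq_of_lt h10
      have hge : ¬ ((n : Int) ≥ 10) := by omega
      by_cases hodd : n % 2 = 1
      · have : (((n / 10 : Nat)) : Int) = 0 ∧ ((n % 2 : Nat) : Int) = 1 := by
          constructor <;> omega
        rw [if_pos this, hasOddDigit]
        simp [hq, hodd]
      · have : ¬ ((((n / 10 : Nat)) : Int) = 0 ∧ ((n % 2 : Nat) : Int) = 1) := by
          intro ⟨_, h⟩; omega
        rw [if_neg this, if_neg hge, hasOddDigit]
        have : ¬ (decide (n % 2 = 1) = true) := by simp [hodd]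
        simp [hq, hodd]
    · have hq : n / 10 ≠ 0 := by
        intro h; have := Nat.div_eq_of_lt (by omega : n < 10); omega
      have hq' : n / 10 ≠ 0 := hq
      have : ¬ ((((n / 10 : Nat)) : Int) = 0 ∧ ((n % 2 : Nat) : Int) = 1) := by
        intro ⟨h, _⟩
        exact hq (by exact_mod_cast h)
      rw [if_neg this, if_pos (by omega : ((n:Int) ≥ 10))]
      exact pv_loop_eq n
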